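-- pv_equiv track=rewrite | github.com/timcallaghan/adventofcode | 2023/09/mirage_maintenance.py | get_sum_of_predictions
-- ===== SOURCE A (Python) =====
-- from typing import List
--
-- def get_sum_of_predictions(history_data: List[List[int]], reverse: bool = False):
--     predictions: List[int] = []
--     for index in range(len(history_data)):
--         current_list = history_data[index][::-1] if reverse else history_data[index]
--
--         last_vals = [current_list[-1]]
--
--         while True:
--             next_list = [x[0] - x[1] for x in zip(current_list[1:], current_list)]
--             if all(value == 0 for value in next_list):
--                 break
--
--             last_vals.append(next_list[-1])
--             current_list = next_list
--
--         predictions.append(sum(last_vals))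
--
--     return sum(predictions)
-- ===== SOURCE B (Python) =====
-- from typing import List
--
-- def _next_value(seq: List[int]) -> int:
--     # Newton forward-difference extrapolation: next value = sum_i (-1)^(n-1-i) * C(n,i) * seq[i],
--     # with the binomial coefficient updated incrementally (O(n) per row).
--     n = len(seq)
--     total = 0
--     c = 1
--     sign = -1 if n % 2 == 0 else 1
--     for i in range(n):
--         total += sign * c * seq[i]
--         c = (c * (n - i)) // (i + 1)
--         sign = -sign
--     return total
--
-- def get_sum_of_predictions(history_data: List[List[int]], reverse: bool = False):
--     return sum(_next_value(row[::-1] if reverse else row) for row in history_data)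
-- ===== Notes on version B (the rewrite author's own statement) =====
-- stated objective: faster
-- what changed: Replaced the per-row repeated-difference table (rebuilding shrinking difference lists until all-zero) by the closed-form Newton forward-difference extrapolation: each row's next value is computed in one pass as sum_i (-1)^(n-1-i)*C(n,i)*row[i] with the binomial coefficient updated incrementally by exact integer arithmetic.
import Mathlib
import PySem

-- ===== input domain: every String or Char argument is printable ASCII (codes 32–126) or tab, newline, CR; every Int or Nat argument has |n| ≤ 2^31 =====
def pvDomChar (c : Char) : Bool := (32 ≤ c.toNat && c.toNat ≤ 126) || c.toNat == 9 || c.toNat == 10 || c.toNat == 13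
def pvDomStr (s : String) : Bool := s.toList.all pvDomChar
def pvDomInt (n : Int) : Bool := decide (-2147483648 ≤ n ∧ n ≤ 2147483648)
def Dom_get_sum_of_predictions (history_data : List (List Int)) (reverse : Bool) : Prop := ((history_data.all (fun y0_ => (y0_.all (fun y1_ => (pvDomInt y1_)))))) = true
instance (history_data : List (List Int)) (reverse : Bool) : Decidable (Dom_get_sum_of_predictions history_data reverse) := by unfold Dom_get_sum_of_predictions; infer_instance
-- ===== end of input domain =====

-- B replaces A's O(n^2)-per-row repeated-difference loop by the closed-form Newton
-- forward-difference extrapolation with incrementally computed binomial coefficients (O(n) per row).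

-- ===== PORT A =====
-- next_list = [x[0] - x[1] for x in zip(current_list[1:], current_list)]
-- (current_list[1:] is PySem.List.slice cur (some 1) none = cur.tail by slice_from_one; zip is List.zip)
def pvDiffsA (cur : List Int) : List Int :=
  ((PySem.List.slice cur (some 1) none).zip cur).map (fun x => x.1 - x.2)

-- the 'while True' loop of A, carrying last_vals; terminates since next_list shrinks by one
def pvLoopA (cur : List Int) (lastVals : List Int) : List Int :=
  let next := pvDiffsA cur
  if next.all (fun v => v == 0) then lastVals
  else pvLoopA next (lastVals ++ [(PySem.List.pyGet? next (-1)).getD 0])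
termination_by cur.length
decreasing_by
  rename_i h
  show (pvDiffsA cur).length < cur.length
  have hne : pvDiffsA cur ≠ [] := by
    intro hnil
    simp only [next, hnil] at h
    simp at h
  have hpos : 0 < (pvDiffsA cur).length := List.length_pos_of_ne_nil hne
  have hlen : (pvDiffsA cur).length = cur.length - 1 := by
    simp [pvDiffsA, PySem.List.slice_from_one]
  omega

-- current_list[-1] (inside Pre_ the row is nonempty, so pyGet? returns; .getD 0 totalizes)
def get_sum_of_predictions (history_data : List (List Int)) (reverse : Bool) : Int :=
  (history_data.foldl (fun predictions row =>
      -- row[::-1] is List.reverse (exact: PySem.List.slice?_none_none_neg_one)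
      let current := if reverse then row.reverse else row
      let lastVals := pvLoopA current [(PySem.List.pyGet? current (-1)).getD 0]
      predictions ++ [lastVals.sum]) ([] : List Int)).sum

-- ===== PORT B =====
-- Newton forward-difference extrapolation of one row (Source B's _next_value):
-- fold over range(n) carrying (total, c, sign); c updated by exact integer division.
def pvNextValue (seq : List Int) : Int :=
  ((PySem.List.pyRange 0 seq.length 1).foldl
    (fun (st : Int × Int × Int) i =>
      (st.1 + st.2.2 * st.2.1 * PySem.List.pyGetD seq i 0,
       PySem.Int.floordiv (st.2.1 * ((seq.length : Int) - i)) (i + 1),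
       -st.2.2))
    (0, 1, if seq.length % 2 == 0 then -1 else 1)).1

def get_sum_of_predictions_alt (history_data : List (List Int)) (reverse : Bool) : Int :=
  (history_data.map (fun row => pvNextValue (if reverse then row.reverse else row))).sum

-- ===== PRECONDITION & SPEC =====
-- Pre_ excludes inputs containing an empty row: there A raises IndexError on current_list[-1].
def Pre_get_sum_of_predictions (history_data : List (List Int)) (reverse : Bool) : Prop :=
  ∀ row ∈ history_data, row ≠ []

instance (history_data : List (List Int)) (reverse : Bool) : Decidable (Pre_get_sum_of_predictions history_data reverse) := by unfold Pre_get_sum_of_predictions; infer_instance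

def pvWitness_get_sum_of_predictions : List (List Int) × Bool := ([[0, 3, 6, 9], [10, 13]], false)

def Spec_get_sum_of_predictions (history_data : List (List Int)) (reverse : Bool) (out : Int) : Prop := out = get_sum_of_predictions_alt history_data reverse
instance (history_data : List (List Int)) (reverse : Bool) (out : Int) : Decidable (Spec_get_sum_of_predictions history_data reverse out) := by unfold Spec_get_sum_of_predictions; infer_instance

-- ===== CLAIM (what is proved, stated in full; the proofs are below) =====
def Claim_equal_get_sum_of_predictions : Prop := ∀ (history_data : List (List Int)) (reverse : Bool), Dom_get_sum_of_predictions history_data reverse → Pre_get_sum_of_predictions history_data reverse → Spec_get_sum_of_predictions history_data reverse (get_sum_of_predictions history_data reverse)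

-- ===== LEMMAS AND PROOFS =====

-- mathematical bridge: the Newton forward-difference sum
def pvNS (n : ℕ) (a : ℕ → ℤ) : ℤ :=
  ∑ i ∈ Finset.range n, (-1 : ℤ) ^ (n - 1) * (-1) ^ i * (n.choose i) * a i

-- A-side mathematical recursion: sum of last values of all difference levels
def pvS (l : List Int) : Int :=
  if h : l = [] then 0 else l.getLast h + pvS (pvDiffsA l)
termination_by l.length
decreasing_by
  have hpos : 0 < l.length := List.length_pos_of_ne_nil h
  have hlen : (pvDiffsA l).length = l.length - 1 := by
    simp [pvDiffsA, PySem.List.slice_from_one]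
  omega

lemma pvDiffsA_cons (x y : Int) (t : List Int) :
    pvDiffsA (x :: y :: t) = (y - x) :: pvDiffsA (y :: t) := by
  simp [pvDiffsA, PySem.List.slice_from_one, List.zip_cons_cons]

lemma pvDiffsA_length (l : List Int) : (pvDiffsA l).length = l.length - 1 := by
  simp [pvDiffsA, PySem.List.slice_from_one]

lemma pvDiffsA_getD (l : List Int) (i : ℕ) (hi : i < l.length - 1) :
    (pvDiffsA l).getD i 0 = l.getD (i + 1) 0 - l.getD i 0 := by
  induction l generalizing i with
  | nil => simp at hi
  | cons x t ih =>
    cases t with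
    | nil => simp at hi
    | cons y t' =>
      rw [pvDiffsA_cons]
      cases i with
      | zero => simp
      | succ j =>
        simp only [List.getD_cons_succ]
        have hj : j < (y :: t').length - 1 := by
          simp at hi ⊢; omega
        exact ih j hj

lemma pvDiffsA_all_zero (l : List Int) (h : ∀ x ∈ l, x = 0) : ∀ x ∈ pvDiffsA l, x = 0 := by
  intro z hz
  simp only [pvDiffsA, PySem.List.slice_from_one, List.mem_map] at hz
  obtain ⟨⟨p, q⟩, hpq, rfl⟩ := hz
  have hmem := List.of_mem_zip hpq
  have hp := h p (List.mem_of_mem_tail hmem.1)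
  have hq := h q hmem.2
  simp [hp, hq]

lemma pvS_zero (l : List Int) (h : ∀ x ∈ l, x = 0) : pvS l = 0 := by
  induction l using pvS.induct with
  | case1 => simp [pvS]
  | case2 l hne ih =>
    rw [pvS, dif_neg hne, ih (pvDiffsA_all_zero l h), h (l.getLast hne) (List.getLast_mem hne)]
    ring

lemma pvLoopA_sum (cur lastVals : List Int) :
    (pvLoopA cur lastVals).sum = lastVals.sum + pvS (pvDiffsA cur) := by
  induction cur, lastVals using pvLoopA.induct with
  | case1 cur lastVals next hall =>
    rw [pvLoopA, if_pos hall]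
    have hz : ∀ x ∈ pvDiffsA cur, x = 0 := by
      intro x hx
      simpa using (List.all_eq_true.mp hall) x hx
    rw [pvS_zero _ hz]
    ring
  | case2 cur lastVals next hall ih =>
    simp only [next] at hall ih
    rw [pvLoopA, if_neg hall, ih]
    have hne : pvDiffsA cur ≠ [] := by
      intro hnil; rw [hnil] at hall; simp at hall
    conv_rhs => rw [pvS, dif_neg hne]
    rw [PySem.List.pyGet?_neg_one, List.getLast?_eq_some_getLast hne]
    simp [List.sum_append]
    ring

-- key binomial identity (Pascal step for the alternating Newton sum)
lemma pvCore (n : ℕ) (a : ℕ → ℤ) :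
    ∑ i ∈ Finset.range (n + 1), (-1 : ℤ) ^ i * ((n + 1).choose i) * a i
      = (-1 : ℤ) ^ n * a n
        - (∑ i ∈ Finset.range n, (-1 : ℤ) ^ i * (n.choose i) * a (i + 1))
        + ∑ i ∈ Finset.range n, (-1 : ℤ) ^ i * (n.choose i) * a i := by
  rw [Finset.sum_range_succ']
  have h1 : ∀ i ∈ Finset.range n,
      (-1 : ℤ) ^ (i + 1) * ((n + 1).choose (i + 1)) * a (i + 1)
        = -((-1 : ℤ) ^ i * (n.choose i) * a (i + 1))
          + (-1 : ℤ) ^ (i + 1) * (n.choose (i + 1)) * a (i + 1) := by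
    intro i _
    rw [Nat.choose_succ_succ]
    push_cast
    ring
  rw [Finset.sum_congr rfl h1, Finset.sum_add_distrib, Finset.sum_neg_distrib]
  have h2 : (∑ i ∈ Finset.range n, (-1 : ℤ) ^ (i + 1) * (n.choose (i + 1)) * a (i + 1))
        + (-1 : ℤ) ^ 0 * (((n + 1).choose 0 : ℕ) : ℤ) * a 0
      = ∑ i ∈ Finset.range (n + 1), (-1 : ℤ) ^ i * (n.choose i) * a i := by
    rw [Finset.sum_range_succ']
    norm_num
  rw [Finset.sum_range_succ] at h2
  simp only [Nat.choose_self, Nat.cast_one, Nat.choose_zero_right, pow_zero, one_mul, mul_one] at h2 ⊢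
  linear_combination h2

lemma pvNS_step (n : ℕ) (a b : ℕ → ℤ) (hb : ∀ i < n, b i = a (i + 1) - a i) :
    pvNS (n + 1) a = a n + pvNS n b := by
  cases n with
  | zero => simp [pvNS]
  | succ m =>
    unfold pvNS
    simp only [Nat.add_sub_cancel]
    have hL : ∑ i ∈ Finset.range (m + 1 + 1), (-1 : ℤ) ^ (m + 1) * (-1) ^ i * ((m + 1 + 1).choose i) * a i
        = (-1 : ℤ) ^ (m + 1) * ∑ i ∈ Finset.range (m + 1 + 1), (-1 : ℤ) ^ i * ((m + 1 + 1).choose i) * a i := by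
      rw [Finset.mul_sum]
      exact Finset.sum_congr rfl (fun i _ => by ring)
    have hR : ∑ i ∈ Finset.range (m + 1), (-1 : ℤ) ^ m * (-1) ^ i * ((m + 1).choose i) * b i
        = (-1 : ℤ) ^ m * ((∑ i ∈ Finset.range (m + 1), (-1 : ℤ) ^ i * ((m + 1).choose i) * a (i + 1))
            - ∑ i ∈ Finset.range (m + 1), (-1 : ℤ) ^ i * ((m + 1).choose i) * a i) := by
      rw [mul_sub, Finset.mul_sum, Finset.mul_sum, ← Finset.sum_sub_distrib]
      refine Finset.sum_congr rfl (fun i hi => ?_)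
      rw [hb i (Finset.mem_range.mp hi)]
      ring
    rw [hL, hR, pvCore (m + 1) a]
    have hsq : ((-1 : ℤ) ^ (m + 1)) * ((-1 : ℤ) ^ (m + 1)) = 1 := by
      rw [← pow_add]
      exact Even.neg_one_pow ⟨m + 1, by ring⟩
    have hstep : ((-1 : ℤ) ^ (m + 1)) = -((-1 : ℤ) ^ m) := by
      rw [pow_succ]; ring
    rw [hstep] at hsq ⊢
    linear_combination (a (m + 1)) * hsq

lemma pvS_eq_pvNS (l : List Int) : pvS l = pvNS l.length (fun i => l.getD i 0) := by
  induction l using pvS.induct with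
  | case1 => simp [pvS, pvNS]
  | case2 l hne ih =>
    rw [pvS, dif_neg hne]
    obtain ⟨n, hn⟩ : ∃ n, l.length = n + 1 :=
      ⟨l.length - 1, by have := List.length_pos_of_ne_nil hne; omega⟩
    rw [ih, pvDiffsA_length l, hn]
    simp only [Nat.add_sub_cancel]
    rw [pvNS_step n (fun i => l.getD i 0) (fun i => (pvDiffsA l).getD i 0)
      (fun i hi => pvDiffsA_getD l i (by omega))]
    congr 1
    rw [List.getLast_eq_getElem, List.getD_eq_getElem l 0 (by omega)]
    congr 1
    omega

-- invariant of B's fold: after m steps, total / binomial / sign are in closed form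
lemma pvBfold (n : ℕ) (a : ℕ → ℤ) (s0 : ℤ) (m : ℕ) : m ≤ n →
    (List.range m).foldl
      (fun (st : Int × Int × Int) (k : ℕ) =>
        (st.1 + st.2.2 * st.2.1 * a k,
         PySem.Int.floordiv (st.2.1 * ((n : ℤ) - (k : ℤ))) ((k : ℤ) + 1),
         -st.2.2)) ((0 : ℤ), (1 : ℤ), s0)
      = (∑ i ∈ Finset.range m, s0 * (-1 : ℤ) ^ i * (n.choose i) * a i,
         ((n.choose m : ℕ) : ℤ), s0 * (-1 : ℤ) ^ m) := by
  induction m with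
  | zero => intro _; simp
  | succ m ih =>
    intro hm
    have ih := ih (by omega)
    rw [List.range_succ, List.foldl_append, ih, List.foldl_cons, List.foldl_nil]
    simp only [Prod.mk.injEq]
    refine ⟨by rw [Finset.sum_range_succ]; try ring, ?_, by rw [pow_succ]; try ring⟩
    have hnat : n.choose m * (n - m) = n.choose (m + 1) * (m + 1) :=
      (Nat.choose_succ_right_eq n m).symm
    have hc : ((n.choose m : ℕ) : ℤ) * ((n : ℤ) - (m : ℤ))
        = (((n.choose (m + 1) * (m + 1)) : ℕ) : ℤ) := by
      rw [← hnat]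
      push_cast [Nat.cast_sub (show m ≤ n by omega)]
      ring
    rw [hc]
    have h1 : ((m : ℤ) + 1) = ((m + 1 : ℕ) : ℤ) := by push_cast; ring
    rw [h1, PySem.Int.floordiv_natCast, Nat.mul_div_cancel _ (by omega)]

lemma pvSign (n : ℕ) (hn : n ≠ 0) : (if n % 2 == 0 then (-1 : ℤ) else 1) = (-1 : ℤ) ^ (n - 1) := by
  rcases Nat.even_or_odd n with h | h
  · obtain ⟨k, rfl⟩ := h
    have h2 : (k + k) % 2 = 0 := by omega
    have h3 : k + k - 1 = 2 * (k - 1) + 1 := by omega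
    simp only [h2, beq_self_eq_true, if_true, h3]
    rw [pow_succ, Even.neg_one_pow ⟨k - 1, by ring⟩]
    ring
  · obtain ⟨k, rfl⟩ := h
    have h2 : (2 * k + 1) % 2 = 1 := by omega
    have h3 : 2 * k + 1 - 1 = 2 * k := by omega
    simp only [h2, h3]
    rw [Even.neg_one_pow ⟨k, by ring⟩]
    simp

lemma pvNextValue_eq (seq : List Int) :
    pvNextValue seq = pvNS seq.length (fun i => seq.getD i 0) := by
  rcases Nat.eq_zero_or_pos seq.length with h0 | hpos
  · rw [List.length_eq_zero_iff] at h0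
    subst h0
    simp [pvNextValue, pvNS]
  · unfold pvNextValue pvNS
    rw [PySem.List.pyRange_one, List.foldl_map]
    simp only [sub_zero, Int.toNat_natCast, zero_add, PySem.List.pyGetD_natCast]
    rw [pvBfold seq.length (fun i => seq.getD i 0) _ seq.length le_rfl,
      pvSign seq.length (by omega)]

lemma pvRow_eq (cur : List Int) (h : cur ≠ []) :
    (pvLoopA cur [(PySem.List.pyGet? cur (-1)).getD 0]).sum = pvNextValue cur := by
  rw [pvLoopA_sum, pvNextValue_eq, ← pvS_eq_pvNS]
  conv_rhs => rw [pvS, dif_neg h]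
  rw [PySem.List.pyGet?_neg_one, List.getLast?_eq_some_getLast h]
  simp

lemma pvFoldl_sum (hist : List (List Int)) (f : List Int → Int) (init : List Int) :
    (hist.foldl (fun acc row => acc ++ [f row]) init).sum = init.sum + (hist.map f).sum := by
  induction hist generalizing init with
  | nil => simp
  | cons r t ih => rw [List.foldl_cons, ih]; simp [List.sum_append]; ring

-- ===== VERDICT (by name: the statement is the Claim_ definition above) =====
theorem get_sum_of_predictions_spec : Claim_equal_get_sum_of_predictions := by
  intro hist rev _hdom hpre
  unfold Spec_get_sum_of_predictions get_sum_of_predictions get_sum_of_predictions_alt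
  rw [pvFoldl_sum hist
    (fun row => (pvLoopA (if rev then row.reverse else row)
      [(PySem.List.pyGet? (if rev then row.reverse else row) (-1)).getD 0]).sum) ([] : List Int)]
  simp only [List.sum_nil, zero_add]
  congr 1
  apply List.map_congr_left
  intro row hrow
  have hne : (if rev then row.reverse else row) ≠ [] := by
    have := hpre row hrow
    cases rev <;> simpa
  exact pvRow_eq _ hne
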